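-- pv_equiv track=rewrite | github.com/NMF13579/AgentOS | scripts/check-context-compliance.py | contains_non_auth_block
-- ===== SOURCE A (Python) =====
-- NON_AUTH_SENTENCES = [
--     "Context Pack is not approval.",
--     "Context Pack does not authorize commit, push, merge, release, deployment, or protected changes.",
--     "Context Pack does not replace M27 runtime enforcement.",
--     "Context Pack does not replace Human Gate approval.",
--     "Freshness check is not approval.",
--     "Integrity check is not approval.",
-- ]
--
-- def contains_non_auth_block(body: str) -> bool:
--     lines = [ln.rstrip() for ln in body.splitlines()]
--     starts = [i for i, ln in enumerate(lines) if ln.strip() == NON_AUTH_SENTENCES[0]]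
--     for st in starts:
--         i = st
--         ok = True
--         for sentence in NON_AUTH_SENTENCES[1:]:
--             i += 1
--             blanks = 0
--             while i < len(lines) and lines[i].strip() == "":
--                 blanks += 1
--                 i += 1
--             if blanks > 2:
--                 ok = False
--                 break
--             if i >= len(lines) or lines[i].strip() != sentence:
--                 ok = False
--                 break
--         if ok:
--             return True
--     return False
-- ===== SOURCE B (Python) =====
-- NON_AUTH_SENTENCES = [
--     "Context Pack is not approval.",
--     "Context Pack does not authorize commit, push, merge, release, deployment, or protected changes.",
--     "Context Pack does not replace M27 runtime enforcement.",
--     "Context Pack does not replace Human Gate approval.",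
--     "Freshness check is not approval.",
--     "Integrity check is not approval.",
-- ]
--
--
-- def _window_ok(toks, sentences):
--     for k, s in enumerate(sentences):
--         if k >= len(toks):
--             return False
--         t, b = toks[k]
--         if b > 2 or t != s:
--             return False
--     return True
--
--
-- def contains_non_auth_block(body: str) -> bool:
--     # Compress the text into one token per non-blank line: (stripped text,
--     # number of blank lines immediately before it), then scan once.
--     toks = []
--     pending = 0
--     for ln in body.splitlines():
--         t = ln.strip()
--         if t == "":
--             pending += 1
--         else:
--             toks.append((t, pending))
--             pending = 0
--     rest = NON_AUTH_SENTENCES[1:]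
--     for j, (t, _b) in enumerate(toks):
--         if t == NON_AUTH_SENTENCES[0] and _window_ok(toks[j + 1:], rest):
--             return True
--     return False
-- ===== Notes on version B (the rewrite author's own statement) =====
-- stated objective: alternative
-- what changed: B compresses the text once into tokens (stripped non-blank line, count of blank lines before it) and slides a 6-token window over that list, instead of A's per-start index walk that re-skips blank runs with an inner while loop for each candidate start.
import Mathlib
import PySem

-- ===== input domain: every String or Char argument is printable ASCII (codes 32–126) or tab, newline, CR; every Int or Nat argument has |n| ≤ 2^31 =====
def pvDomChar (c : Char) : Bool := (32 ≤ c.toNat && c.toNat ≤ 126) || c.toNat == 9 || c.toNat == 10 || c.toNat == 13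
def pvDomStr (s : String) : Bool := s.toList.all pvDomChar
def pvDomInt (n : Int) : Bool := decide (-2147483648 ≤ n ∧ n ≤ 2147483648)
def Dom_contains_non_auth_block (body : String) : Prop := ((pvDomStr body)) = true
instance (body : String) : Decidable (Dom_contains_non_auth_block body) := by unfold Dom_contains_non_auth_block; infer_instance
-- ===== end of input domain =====

-- B replaces A's per-start index walk (inner while loop re-skipping blank runs) by one
-- compressed token list (stripped non-blank line, blanks before it) plus a single window scan;
-- alternative decomposition, same asymptotic cost.

def pvSentences : List String := [
  "Context Pack is not approval.",
  "Context Pack does not authorize commit, push, merge, release, deployment, or protected changes.",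
  "Context Pack does not replace M27 runtime enforcement.",
  "Context Pack does not replace Human Gate approval.",
  "Freshness check is not approval.",
  "Integrity check is not approval."]

-- ===== PORT A =====
-- the 'while i < len(lines) and lines[i].strip() == ""' loop: returns final (i, blanks)
def pvSkipBlanks (lines : List String) (i blanks : Nat) : Nat × Nat :=
  if h : i < lines.length then
    if PySem.Str.strip lines[i] == "" then pvSkipBlanks lines (i + 1) (blanks + 1)
    else (i, blanks)
  else (i, blanks)
termination_by lines.length - i

-- the 'for sentence in NON_AUTH_SENTENCES[1:]' loop with its breaks, starting at index i
def pvCheckFrom (lines : List String) : Nat → List String → Bool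
  | _, [] => true
  | i, s :: ss =>
    let r := pvSkipBlanks lines (i + 1) 0
    if r.2 > 2 then false
    else
      match PySem.List.pyGet? lines (r.1 : Int) with
      | none => false
      | some ln => if PySem.Str.strip ln ≠ s then false else pvCheckFrom lines r.1 ss

def contains_non_auth_block (body : String) : Bool :=
  let lines := (PySem.Str.splitlines body).map PySem.Str.rstrip
  let starts := ((PySem.List.enumerate lines 0).filter
      (fun p => PySem.Str.strip p.2 == "Context Pack is not approval.")).map (·.1)
  starts.any (fun st => pvCheckFrom lines st.toNat pvSentences.tail)

-- ===== PORT B =====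
-- token build loop: one (strippedText, blanksBefore) token per non-blank line
def pvTokensGo : Nat → List String → List (String × Nat)
  | _, [] => []
  | pending, ln :: rest =>
    let t := PySem.Str.strip ln
    if t == "" then pvTokensGo (pending + 1) rest
    else (t, pending) :: pvTokensGo 0 rest

-- _window_ok: the next tokens must carry sentences 1..5 in order, each with ≤ 2 blanks before it
def pvWindowOk : List (String × Nat) → List String → Bool
  | _, [] => true
  | [], _ :: _ => false
  | (t, b) :: toks, s :: ss => if b > 2 || t ≠ s then false else pvWindowOk toks ss

-- the scan over tokens ('for j, (t, _b) in enumerate(toks)' with toks[j+1:])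
def pvScan : List (String × Nat) → Bool
  | [] => false
  | (t, _) :: toks =>
    if t == "Context Pack is not approval." && pvWindowOk toks pvSentences.tail then true
    else pvScan toks

def contains_non_auth_block_alt (body : String) : Bool :=
  pvScan (pvTokensGo 0 (PySem.Str.splitlines body))

-- ===== PRECONDITION & SPEC =====
def Spec_contains_non_auth_block (body : String) (out : Bool) : Prop := out = contains_non_auth_block_alt body
instance (body : String) (out : Bool) : Decidable (Spec_contains_non_auth_block body out) := by unfold Spec_contains_non_auth_block; infer_instance

-- ===== CLAIM (what is proved, stated in full; the proofs are below) =====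
def Claim_equal_contains_non_auth_block : Prop := ∀ (body : String), Dom_contains_non_auth_block body → Spec_contains_non_auth_block body (contains_non_auth_block body)

-- ===== LEMMAS AND PROOFS =====

-- dropBlanks: count and strip the leading blank lines (proof-side mirror of the while loop)
def pvDB (L : List String) : Nat × List String :=
  match L with
  | [] => (0, [])
  | x :: xs =>
    if PySem.Str.strip x == "" then
      let r := pvDB xs
      (r.1 + 1, r.2)
    else (0, x :: xs)

theorem pvDB_drop (L : List String) : L.drop (pvDB L).1 = (pvDB L).2 := by
  induction L with
  | nil => simp [pvDB]
  | cons x xs ih =>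
    by_cases h : PySem.Str.strip x == ""
    · simp [pvDB, h, ih]
    · simp [pvDB, h]

theorem pvSkipBlanks_eq (L : List String) (i b : Nat) :
    pvSkipBlanks L i b = (i + (pvDB (L.drop i)).1, b + (pvDB (L.drop i)).1) := by
  fun_induction pvSkipBlanks L i b with
  | case1 i b h hblank ih =>
    have hd : L.drop i = L[i] :: L.drop (i + 1) := by
      rw [List.drop_eq_getElem_cons h]
    rw [ih, hd]
    simp [pvDB, hblank]
    omega
  | case2 i b h hblank =>
    have hd : L.drop i = L[i] :: L.drop (i + 1) := by
      rw [List.drop_eq_getElem_cons h]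
    rw [hd]
    simp [pvDB, hblank]
  | case3 i b h =>
    have : L.drop i = [] := List.drop_eq_nil_of_le (by omega)
    simp [this, pvDB]

theorem pvTokensGo_eq (L : List String) : ∀ p, pvTokensGo p L =
    match pvDB L with
    | (_, []) => []
    | (k, x :: xs) => (PySem.Str.strip x, p + k) :: pvTokensGo 0 xs := by
  induction L with
  | nil => intro p; simp [pvTokensGo, pvDB]
  | cons x xs ih =>
    intro p
    by_cases h : PySem.Str.strip x == ""
    · rw [pvTokensGo, if_pos h, ih]
      cases hdb : pvDB xs with
      | mk k r =>
        cases r with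
        | nil => simp [pvDB, h, hdb]
        | cons y ys => simp [pvDB, h, hdb]; omega
    · simp [pvTokensGo, h, pvDB]

-- the inner sentence loop of A, at index i, equals the window check on the tokens of drop (i+1)
theorem pvCheckFrom_eq (L : List String) (ss : List String) : ∀ i,
    pvCheckFrom L i ss = pvWindowOk (pvTokensGo 0 (L.drop (i + 1))) ss := by
  induction ss with
  | nil => intro i; cases h : pvTokensGo 0 (L.drop (i + 1)) <;> simp [pvCheckFrom, pvWindowOk]
  | cons s ss ih =>
    intro i
    rw [pvCheckFrom, pvSkipBlanks_eq]
    rw [pvTokensGo_eq]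
    cases hdb : pvDB (L.drop (i + 1)) with
    | mk k r =>
      have hdrop : L.drop (i + 1 + k) = r := by
        have := pvDB_drop (L.drop (i + 1)); rw [hdb] at this
        simpa [List.drop_drop, Nat.add_comm] using this
      cases r with
      | nil =>
        have hnone : PySem.List.pyGet? L ((i + 1 + k : Nat) : Int) = none := by
          rw [PySem.List.pyGet?_natCast, ← List.head?_drop, hdrop]; rfl
        dsimp only
        rw [hnone]
        simp only [pvWindowOk]
        by_cases hk : k > 2
        · simp [hk]
        · simp [hk]
      | cons x xs =>
        have hsome : PySem.List.pyGet? L ((i + 1 + k : Nat) : Int) = some x := by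
          rw [PySem.List.pyGet?_natCast, ← List.head?_drop, hdrop]; rfl
        have hxs : L.drop (i + 1 + k + 1) = xs := by
          have : (L.drop (i + 1 + k)).drop 1 = xs := by rw [hdrop]; rfl
          simpa [List.drop_drop, Nat.add_comm] using this
        dsimp only
        rw [hsome]
        simp only [pvWindowOk]
        by_cases hk : k > 2
        · simp [hk]
        · by_cases hx : PySem.Str.strip x = s
          · simp [hk, hx, ih, hxs]
          · simp [hk, hx]

-- pvScan ignores the pending count carried into the first token
theorem pvScan_pending (L : List String) : ∀ p, pvScan (pvTokensGo p L) = pvScan (pvTokensGo 0 L) := by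
  induction L with
  | nil => intro p; rfl
  | cons x xs ih =>
    intro p
    by_cases h : PySem.Str.strip x == ""
    · simp only [pvTokensGo, h, if_pos]
      rw [ih (p + 1), ih (0 + 1)]
    · simp [pvTokensGo, h, pvScan]

-- the main bridge: A's any-over-starts on a suffix equals B's scan of that suffix's tokens
theorem pvMain (L0 : List String) : ∀ (L : List String) (n : Nat), L0.drop n = L →
    ((PySem.List.enumerate L (n : Int)).any
        (fun p => (PySem.Str.strip p.2 == "Context Pack is not approval.") &&
          pvCheckFrom L0 p.1.toNat pvSentences.tail))
      = pvScan (pvTokensGo 0 L) := by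
  intro L
  induction L with
  | nil => intro n _; simp [PySem.List.enumerate_nil, pvTokensGo, pvScan]
  | cons x xs ih =>
    intro n hdrop
    have hxs : L0.drop (n + 1) = xs := by
      have : (L0.drop n).drop 1 = xs := by rw [hdrop]; rfl
      simpa [List.drop_drop, Nat.add_comm] using this
    rw [PySem.List.enumerate_cons]
    have hcast : (n : Int) + 1 = ((n + 1 : Nat) : Int) := by push_cast; ring
    rw [List.any_cons, hcast, ih (n + 1) hxs]
    have hchk : pvCheckFrom L0 ((n : Int)).toNat pvSentences.tail
        = pvWindowOk (pvTokensGo 0 xs) pvSentences.tail := by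
      rw [Int.toNat_natCast, pvCheckFrom_eq, hxs]
    by_cases h : PySem.Str.strip x == ""
    · have hne : (PySem.Str.strip x == "Context Pack is not approval.") = false := by
        have := eq_of_beq h
        simp [this]
      simp only [pvTokensGo, h, if_pos]
      simp only [hne, Bool.false_and, Bool.false_or]
      exact (pvScan_pending xs (0 + 1)).symm
    · simp only [pvTokensGo, h, if_neg, Bool.false_eq_true, not_false_eq_true, pvScan]
      rw [hchk]
      by_cases hs : (PySem.Str.strip x == "Context Pack is not approval.")
          && pvWindowOk (pvTokensGo 0 xs) pvSentences.tail
      · simp [hs]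
      · simp only [Bool.not_eq_true] at hs
        rw [hs]
        simp

-- Python's .strip() of an .rstrip()ed line is its .strip()
theorem pvDropWhile_idem {α : Type} (p : α → Bool) (l : List α) :
    List.dropWhile p (List.dropWhile p l) = List.dropWhile p l := by
  induction l with
  | nil => rfl
  | cons x xs ih =>
    by_cases h : p x
    · simp [h, ih]
    · simp [h]

theorem pvDropWhile_comm {α : Type} (p : α → Bool) (l : List α) :
    List.dropWhile p ((List.dropWhile p l.reverse).reverse)
      = (List.dropWhile p (List.dropWhile p l).reverse).reverse := by
  induction l using List.reverseRecOn with
  | nil => rfl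
  | append_singleton l x ih =>
    by_cases hx : p x
    · rw [List.reverse_append, List.reverse_singleton, List.singleton_append,
        List.dropWhile_cons, if_pos hx]
      rw [ih]
      rw [List.dropWhile_append]
      by_cases he : (List.dropWhile p l).isEmpty
      · simp only [he, if_pos]
        simp only [List.isEmpty_iff] at he
        simp [he, hx]
      · simp only [he, if_neg, Bool.false_eq_true, not_false_eq_true]
        rw [List.reverse_append, List.reverse_singleton, List.singleton_append,
          List.dropWhile_cons, if_pos hx]
    · have hLHS : (List.dropWhile p (l ++ [x]).reverse).reverse = l ++ [x] := by
        simp [List.reverse_append, hx]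
      rw [hLHS]
      rcases hdl : List.dropWhile p l with _ | ⟨c, cs⟩
      · have h2 : List.dropWhile p (l ++ [x]) = [x] := by
          simp [List.dropWhile_append, hdl, hx]
        rw [h2]
        simp [hx]
      · have h2 : List.dropWhile p (l ++ [x]) = c :: cs ++ [x] := by
          simp [List.dropWhile_append, hdl]
        rw [h2]
        simp [List.reverse_append, hx]

theorem pvChars_strip_rstrip (s : List Char) :
    PySem.Chars.strip (PySem.Chars.rstrip s) = PySem.Chars.strip s := by
  unfold PySem.Chars.strip PySem.Chars.rstrip PySem.Chars.lstrip
  rw [pvDropWhile_comm, List.reverse_reverse, pvDropWhile_idem]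
  exact pvDropWhile_comm _ s

theorem pvStr_strip_rstrip (s : String) :
    PySem.Str.strip (PySem.Str.rstrip s) = PySem.Str.strip s := by
  unfold PySem.Str.strip PySem.Str.rstrip
  simp [pvChars_strip_rstrip]

theorem pvTokensGo_rstrip (L : List String) : ∀ p,
    pvTokensGo p (L.map PySem.Str.rstrip) = pvTokensGo p L := by
  induction L with
  | nil => intro p; rfl
  | cons x xs ih =>
    intro p
    simp only [List.map_cons, pvTokensGo, pvStr_strip_rstrip]
    by_cases h : PySem.Str.strip x == "" <;> simp [h, ih]

-- ===== VERDICT (by name: the statement is the Claim_ definition above) =====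
theorem contains_non_auth_block_spec : Claim_equal_contains_non_auth_block := by
  intro body _
  unfold Spec_contains_non_auth_block contains_non_auth_block contains_non_auth_block_alt
  set lines := (PySem.Str.splitlines body).map PySem.Str.rstrip with hlines
  simp only [List.any_map, List.any_filter, Function.comp_def]
  have := pvMain lines lines 0 (by simp)
  rw [show ((0 : Nat) : Int) = (0 : Int) by rfl] at this
  rw [this]
  rw [hlines, pvTokensGo_rstrip]
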